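-- pv_equiv track=rewrite | github.com/srikanthgali/enterprise-marketing-ai-agents | tests/evaluation/test_prompts.py | _check_empathy
-- ===== SOURCE A (Python) =====
-- def _check_empathy(output_str: str) -> bool:
--     """Check for empathetic tone."""
--     empathy_indicators = [
--         "understand",
--         "appreciate",
--         "apologize",
--         "sorry",
--         "frustrated",
--         "help you",
--         "assist you",
--         "here for you",
--     ]
--     return any(indicator in output_str for indicator in empathy_indicators)
-- ===== SOURCE B (Python) =====
-- def _check_empathy(output_str: str) -> bool:
--     """Check for empathetic tone: one left-to-right scan, prefix-matching all indicators at each position."""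
--     indicators = (
--         "understand",
--         "appreciate",
--         "apologize",
--         "sorry",
--         "frustrated",
--         "help you",
--         "assist you",
--         "here for you",
--     )
--     for i in range(len(output_str)):
--         for ind in indicators:
--             if output_str.startswith(ind, i):
--                 return True
--     return False
-- ===== Notes on version B (the rewrite author's own statement) =====
-- stated objective: alternative
-- what changed: B replaces eight independent whole-string substring membership scans (one per indicator) with a single left-to-right pass over the string positions, checking all eight indicators as prefixes at each position.
import Mathlib
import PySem

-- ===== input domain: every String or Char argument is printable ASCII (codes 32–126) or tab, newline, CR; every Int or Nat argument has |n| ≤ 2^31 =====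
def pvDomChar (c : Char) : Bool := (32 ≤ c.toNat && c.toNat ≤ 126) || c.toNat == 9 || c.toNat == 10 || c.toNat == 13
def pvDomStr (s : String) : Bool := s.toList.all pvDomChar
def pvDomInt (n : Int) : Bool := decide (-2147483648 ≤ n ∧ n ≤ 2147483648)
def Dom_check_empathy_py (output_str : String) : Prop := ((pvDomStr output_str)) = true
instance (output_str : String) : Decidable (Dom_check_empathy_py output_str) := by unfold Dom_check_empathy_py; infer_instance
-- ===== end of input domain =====

-- B changes the traversal (one scan over the string's positions, prefix-matching all indicators
-- at each position, instead of eight independent substring scans); same cost class, alternative structure.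

-- ===== PORT A =====
def empathy_indicators : List String :=
  ["understand", "appreciate", "apologize", "sorry",
   "frustrated", "help you", "assist you", "here for you"]

-- any(indicator in output_str for indicator in empathy_indicators)
def check_empathy_py (output_str : String) : Bool :=
  empathy_indicators.any (fun indicator => PySem.Str.isIn indicator output_str)

-- ===== PORT B =====
-- the same eight indicator constants, as character lists (B works character-wise)
def empathy_indicators_alt : List (List Char) :=
  [['u', 'n', 'd', 'e', 'r', 's', 't', 'a', 'n', 'd'],
   ['a', 'p', 'p', 'r', 'e', 'c', 'i', 'a', 't', 'e'],
   ['a', 'p', 'o', 'l', 'o', 'g', 'i', 'z', 'e'],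
   ['s', 'o', 'r', 'r', 'y'],
   ['f', 'r', 'u', 's', 't', 'r', 'a', 't', 'e', 'd'],
   ['h', 'e', 'l', 'p', ' ', 'y', 'o', 'u'],
   ['a', 's', 's', 'i', 's', 't', ' ', 'y', 'o', 'u'],
   ['h', 'e', 'r', 'e', ' ', 'f', 'o', 'r', ' ', 'y', 'o', 'u']]

-- Source B's scan 'for i in range(len(output_str)): if any(output_str.startswith(ind, i) ...): return True':
-- recursion over the suffixes of the string; output_str.startswith(ind, i) is the prefix check
-- PySem.Chars.startswith on the current suffix.
def check_empathy_scan (cs : List Char) : Bool :=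
  match cs with
  | [] => false
  | _ :: t =>
    if empathy_indicators_alt.any (fun ind => PySem.Chars.startswith cs ind) then true
    else check_empathy_scan t

def check_empathy_py_alt (output_str : String) : Bool :=
  check_empathy_scan output_str.toList

-- ===== PRECONDITION & SPEC =====
def Spec_check_empathy_py (output_str : String) (out : Bool) : Prop := out = check_empathy_py_alt output_str
instance (output_str : String) (out : Bool) : Decidable (Spec_check_empathy_py output_str out) := by unfold Spec_check_empathy_py; infer_instance

-- ===== CLAIM (what is proved, stated in full; the proofs are below) =====
def Claim_equal_check_empathy_py : Prop := ∀ (output_str : String), Dom_check_empathy_py output_str → Spec_check_empathy_py output_str (check_empathy_py output_str)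

-- ===== LEMMAS AND PROOFS =====

-- the scan succeeds exactly when some indicator is an infix of the string
lemma check_empathy_scan_iff (cs : List Char) :
    check_empathy_scan cs = true ↔ ∃ ind ∈ empathy_indicators_alt, ind <:+: cs := by
  induction cs with
  | nil => decide
  | cons a t ih =>
      have hstep : check_empathy_scan (a :: t)
          = (empathy_indicators_alt.any (fun ind => PySem.Chars.startswith (a :: t) ind)
             || check_empathy_scan t) := by
        rw [check_empathy_scan]; split_ifs with h <;> simp [h]
      rw [hstep, Bool.or_eq_true, List.any_eq_true, ih]
      constructor
      · rintro (⟨ind, hmem, hpre⟩ | ⟨ind, hmem, hinf⟩)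
        · exact ⟨ind, hmem, ((PySem.Chars.startswith_iff _ _).mp hpre).isInfix⟩
        · exact ⟨ind, hmem, List.infix_cons_iff.mpr (Or.inr hinf)⟩
      · rintro ⟨ind, hmem, hinf⟩
        rcases List.infix_cons_iff.mp hinf with hpre | hinf'
        · exact Or.inl ⟨ind, hmem, (PySem.Chars.startswith_iff _ _).mpr hpre⟩
        · exact Or.inr ⟨ind, hmem, hinf'⟩

-- B's char-list constants are A's string constants, character-wise
lemma empathy_indicators_toList :
    empathy_indicators.map String.toList = empathy_indicators_alt := by decide

theorem check_empathy_py_spec : Claim_equal_check_empathy_py := by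
  intro s _
  unfold Spec_check_empathy_py check_empathy_py check_empathy_py_alt
  rw [Bool.eq_iff_iff, List.any_eq_true, check_empathy_scan_iff]
  constructor
  · rintro ⟨ind, hmem, h⟩
    rw [PySem.Str.isIn_iff_infix] at h
    exact ⟨ind.toList, by rw [← empathy_indicators_toList]; exact List.mem_map_of_mem hmem, h⟩
  · rintro ⟨ind, hmem, h⟩
    rw [← empathy_indicators_toList] at hmem
    obtain ⟨i, hi, rfl⟩ := List.mem_map.mp hmem
    exact ⟨i, hi, (PySem.Str.isIn_iff_infix _ _).mpr h⟩
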